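-- pv_equiv track=rewrite | github.com/FerranGuardia/Nexus | nexus/server.py | _detect_focus_target
-- ===== SOURCE A (Python) =====
-- def _detect_focus_target(action, app_param):
--     """Detect which app should have focus after this action.
--
--     Returns app name string if focus should be restored, None otherwise.
--     Only triggers for actions that explicitly move focus to another app.
--     """
--     # For action chains, check the last action (it determines final focus)
--     if ";" in action:
--         parts = action.split(";")
--         last_action = parts[-1].strip()
--         # But also check earlier actions for app switches
--         for part in reversed(parts):
--             result = _detect_focus_target(part.strip(), app_param)
--             if result:
--                 return result
--         return None
--
--     lower = action.strip().lower()
--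
--     # Getter actions never need focus restore
--     if any(lower.startswith(g) for g in (
--         "get ", "read ", "clipboard", "url", "tabs", "source",
--         "hover", "observe",
--     )):
--         return None
--
--     # "switch to Safari", "open Safari" — extract target app name
--     for prefix in ("switch to ", "activate ", "bring "):
--         if lower.startswith(prefix):
--             target = action.strip()[len(prefix):]
--             if target and not target.lower().startswith("tab"):
--                 return target
--
--     if lower.startswith("open "):
--         target = action.strip()[5:]
--         # Don't restore for "open file.txt" — only for app names
--         if target and "." not in target and "/" not in target:
--             return target
--
--     # app= parameter targets a specific app — restore focus there
--     # (only for mutating actions like click, type, press)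
--     if app_param and any(lower.startswith(v) for v in (
--         "click", "type", "press", "fill", "scroll", "drag",
--         "focus", "close", "select", "tap", "hit",
--     )):
--         return app_param
--
--     return None
-- ===== SOURCE B (Python) =====
-- # Different decomposition: one uniform forward pass over the split parts keeping the
-- # LAST focus-moving result (A scans the reversed parts for the FIRST), driven by a
-- # single ordered rule table instead of A's hard-coded branch chain; no recursion and
-- # no special case for chain-free actions.
--
-- _RULES = (
--     ("get ", "stop"), ("read ", "stop"), ("clipboard", "stop"), ("url", "stop"),
--     ("tabs", "stop"), ("source", "stop"), ("hover", "stop"), ("observe", "stop"),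
--     ("switch to ", "switch"), ("activate ", "switch"), ("bring ", "switch"),
--     ("open ", "open"),
--     ("click", "app"), ("type", "app"), ("press", "app"), ("fill", "app"),
--     ("scroll", "app"), ("drag", "app"), ("focus", "app"), ("close", "app"),
--     ("select", "app"), ("tap", "app"), ("hit", "app"),
-- )
--
--
-- def _classify(action, app_param):
--     """Classify ONE action via the first matching rule of the ordered table."""
--     stripped = action.strip()
--     low = stripped.lower()
--     for prefix, kind in _RULES:
--         if not low.startswith(prefix):
--             continue
--         if kind == "stop":
--             return None
--         if kind == "switch":
--             target = stripped[len(prefix):]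
--             return target if target and not target.lower().startswith("tab") else None
--         if kind == "open":
--             target = stripped[5:]
--             return target if target and "." not in target and "/" not in target else None
--         return app_param if app_param else None
--     return None
--
--
-- def _detect_focus_target(action, app_param):
--     best = None
--     for part in action.split(";"):
--         result = _classify(part, app_param)
--         if result:
--             best = result
--     return best
-- ===== Notes on version B (the rewrite author's own statement) =====
-- stated objective: alternative
-- what changed: Replaces A's recursive reversed-order early-return scan of the chain parts by one uniform non-recursive forward pass that keeps the last focus-moving result (no special case for ';'-free actions), and replaces the hard-coded branch chain per action by a single ordered prefix-rule table scanned for the first match; the unused last_action computation is dropped.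
import Mathlib
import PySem

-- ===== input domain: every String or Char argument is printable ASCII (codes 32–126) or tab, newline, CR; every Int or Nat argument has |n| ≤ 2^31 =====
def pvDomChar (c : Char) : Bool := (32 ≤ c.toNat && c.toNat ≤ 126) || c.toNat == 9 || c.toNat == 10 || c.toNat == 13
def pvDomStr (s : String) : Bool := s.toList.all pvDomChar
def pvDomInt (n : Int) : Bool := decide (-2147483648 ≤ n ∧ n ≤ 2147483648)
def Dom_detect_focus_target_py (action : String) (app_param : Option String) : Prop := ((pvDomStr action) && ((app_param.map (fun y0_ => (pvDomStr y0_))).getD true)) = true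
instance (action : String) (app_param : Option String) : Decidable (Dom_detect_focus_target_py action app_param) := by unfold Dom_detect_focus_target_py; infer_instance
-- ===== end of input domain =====

-- B replaces A's recursive reversed scan for the FIRST focus-moving part by one uniform
-- forward pass keeping the LAST focus-moving result, and replaces A's hard-coded branch
-- chain by a single ordered rule table scanned for the first matching prefix.

-- ===== PORT A =====
-- Python truthiness of a value that is either a string or None (`if result:` / `if app_param and …`).
def pyTruthyOptStr (o : Option String) : Bool :=
  match o with
  | some s => s != ""
  | none => false

-- Literal port of A.  Python A recurses on the stripped parts of an action chain; the Nat
-- fuel argument only bounds that recursion depth (split parts contain no ';', so the depth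
-- is at most 2 and the initial fuel `length + 1 ≥ 1` is never exhausted).
def detect_focus_target_py_go : Nat → String → Option String → Option String
  | 0, _, _ => none   -- unreachable: fuel bounds the recursion depth
  | fuel + 1, action, app_param =>
    if PySem.Str.isIn ";" action then
      -- parts = action.split(";")  (the separator ";" is a non-empty literal, so split? is always some)
      let parts := (PySem.Str.split? action ";").getD []
      -- last_action = parts[-1].strip()  (computed by A, never used; split never returns [])
      let _last_action := (PySem.List.pyGet? parts (-1)).map PySem.Str.strip
      -- for part in reversed(parts): result = _detect_focus_target(part.strip(), app_param); if result: return result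
      let r := parts.reverse.foldl
        (fun acc part =>
          if pyTruthyOptStr acc then acc
          else detect_focus_target_py_go fuel (PySem.Str.strip part) app_param) none
      if pyTruthyOptStr r then r else none
    else
      let lower := PySem.Str.lower (PySem.Str.strip action)
      if ["get ", "read ", "clipboard", "url", "tabs", "source", "hover", "observe"].any
          (fun g => PySem.Str.startswith lower g) then none
      else
        -- the for-loop over the literal 3-tuple ("switch to ", "activate ", "bring "), unrolled:
        -- each `return target` is a branch, falling through the loop is the else-chain
        let t1 := PySem.Str.slice (PySem.Str.strip action) (some 10) none
        if PySem.Str.startswith lower "switch to " &&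
            (t1 != "" && !PySem.Str.startswith (PySem.Str.lower t1) "tab") then some t1
        else
          let t2 := PySem.Str.slice (PySem.Str.strip action) (some 9) none
          if PySem.Str.startswith lower "activate " &&
              (t2 != "" && !PySem.Str.startswith (PySem.Str.lower t2) "tab") then some t2
          else
            let t3 := PySem.Str.slice (PySem.Str.strip action) (some 6) none
            if PySem.Str.startswith lower "bring " &&
                (t3 != "" && !PySem.Str.startswith (PySem.Str.lower t3) "tab") then some t3
            else
              let t4 := PySem.Str.slice (PySem.Str.strip action) (some 5) none
              if PySem.Str.startswith lower "open " &&
                  (t4 != "" && !(PySem.Str.isIn "." t4) && !(PySem.Str.isIn "/" t4)) then some t4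
              else
                if pyTruthyOptStr app_param &&
                    ["click", "type", "press", "fill", "scroll", "drag",
                     "focus", "close", "select", "tap", "hit"].any
                      (fun v => PySem.Str.startswith lower v) then app_param
                else none

def detect_focus_target_py (action : String) (app_param : Option String) : Option String :=
  detect_focus_target_py_go (action.toList.length + 1) action app_param

-- ===== PORT B =====
-- The ordered rule table _RULES of Source B.
def pvRules : List (String × String) :=
  [("get ", "stop"), ("read ", "stop"), ("clipboard", "stop"), ("url", "stop"),
   ("tabs", "stop"), ("source", "stop"), ("hover", "stop"), ("observe", "stop"),
   ("switch to ", "switch"), ("activate ", "switch"), ("bring ", "switch"),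
   ("open ", "open"),
   ("click", "app"), ("type", "app"), ("press", "app"), ("fill", "app"),
   ("scroll", "app"), ("drag", "app"), ("focus", "app"), ("close", "app"),
   ("select", "app"), ("tap", "app"), ("hit", "app")]

-- the `for prefix, kind in _RULES` scan of Source B's _classify
def rules_loop (stripped low : String) (app_param : Option String) :
    List (String × String) → Option String
  | [] => none
  | (pre, kind) :: rest =>
    if !PySem.Str.startswith low pre then rules_loop stripped low app_param rest
    else if kind = "stop" then none
    else if kind = "switch" then
      let target := PySem.Str.slice stripped (some (PySem.Str.len pre)) none
      if target != "" && !PySem.Str.startswith (PySem.Str.lower target) "tab" then some target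
      else none
    else if kind = "open" then
      let target := PySem.Str.slice stripped (some 5) none
      if target != "" && !(PySem.Str.isIn "." target) && !(PySem.Str.isIn "/" target) then some target
      else none
    else if pyTruthyOptStr app_param then app_param else none

-- Source B's _classify: one action, first matching rule of the table decides
def classify_b (action : String) (app_param : Option String) : Option String :=
  let stripped := PySem.Str.strip action
  let low := PySem.Str.lower stripped
  rules_loop stripped low app_param pvRules

-- Source B's _detect_focus_target: uniform forward pass keeping the last truthy result
def detect_focus_target_py_alt (action : String) (app_param : Option String) : Option String :=
  ((PySem.Str.split? action ";").getD []).foldl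
    (fun best part =>
      let result := classify_b part app_param
      if pyTruthyOptStr result then result else best) none

-- ===== PRECONDITION & SPEC =====
def Spec_detect_focus_target_py (action : String) (app_param : Option String) (out : Option String) : Prop := out = detect_focus_target_py_alt action app_param
instance (action : String) (app_param : Option String) (out : Option String) : Decidable (Spec_detect_focus_target_py action app_param out) := by unfold Spec_detect_focus_target_py; infer_instance

-- ===== CLAIM (what is proved, stated in full; the proofs are below) =====
def Claim_equal_detect_focus_target_py : Prop := ∀ (action : String) (app_param : Option String), Dom_detect_focus_target_py action app_param → Spec_detect_focus_target_py action app_param (detect_focus_target_py action app_param)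

-- ===== LEMMAS AND PROOFS =====

-- Pieces of a split on the single-character separator never contain that character.
lemma splitOn_go_single_not_mem (c : Char) : ∀ (fuel : Nat) (l cur : List Char)
    (acc : List (List Char)), l.length < fuel → (∀ p ∈ acc, c ∉ p) → c ∉ cur →
    ∀ p ∈ PySem.Chars.splitOn.go [c] fuel l cur acc, c ∉ p := by
  intro fuel
  induction fuel with
  | zero => intro l cur acc h; omega
  | succ fuel ih =>
    intro l cur acc hlen hacc hcur p hp
    cases l with
    | nil =>
      simp [PySem.Chars.splitOn.go] at hp
      rcases hp with h | h
      · exact hacc _ h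
      · subst h; simpa using hcur
    | cons ch rest =>
      by_cases hpre : [c].isPrefixOf (ch :: rest) = true
      · rw [show PySem.Chars.splitOn.go [c] (fuel+1) (ch :: rest) cur acc =
            PySem.Chars.splitOn.go [c] fuel (List.drop [c].length (ch :: rest)) [] (cur.reverse :: acc) from by
          simp [PySem.Chars.splitOn.go, hpre]] at hp
        refine ih _ _ _ (by simp at hlen ⊢; omega) ?_ (by simp) p hp
        intro q hq
        rcases List.mem_cons.mp hq with h | h
        · subst h; simpa using hcur
        · exact hacc _ h
      · rw [show PySem.Chars.splitOn.go [c] (fuel+1) (ch :: rest) cur acc =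
            PySem.Chars.splitOn.go [c] fuel rest (ch :: cur) acc from by
          simp [PySem.Chars.splitOn.go, hpre]] at hp
        have hne : ch ≠ c := by
          intro h; subst h; simp [List.isPrefixOf] at hpre
        refine ih _ _ _ (by simp at hlen ⊢; omega) hacc ?_ p hp
        simp [hcur]
        exact fun h => hne h.symm

lemma splitOn_single_not_mem (c : Char) (s : List Char) :
    ∀ p ∈ PySem.Chars.splitOn s [c], c ∉ p := by
  intro p hp
  exact splitOn_go_single_not_mem c (s.length + 1) s [] [] (by omega) (by simp) (by simp) p hp

lemma mem_of_mem_strip {a : Char} {l : List Char} (h : a ∈ PySem.Chars.strip l) : a ∈ l := by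
  simp [PySem.Chars.strip, PySem.Chars.rstrip, PySem.Chars.lstrip, List.mem_reverse] at h
  have h1 := (List.dropWhile_sublist (l := (List.dropWhile PySem.Chars.isspace l).reverse)
    PySem.Chars.isspace).mem h
  rw [List.mem_reverse] at h1
  exact (List.dropWhile_sublist _).mem h1

-- Splitting on ';' when the string contains no ';' yields the one-element list.
lemma splitOn_go_no_sep : ∀ (fuel : Nat) (l cur : List Char) (acc : List (List Char)),
    l.length < fuel → ';' ∉ l →
    PySem.Chars.splitOn.go [';'] fuel l cur acc = ((cur.reverse ++ l) :: acc).reverse := by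
  intro fuel
  induction fuel with
  | zero => intro l cur acc h; omega
  | succ fuel ih =>
    intro l cur acc hlen hmem
    cases l with
    | nil => simp [PySem.Chars.splitOn.go]
    | cons c rest =>
      have hc : (';' : Char) ≠ c := fun h => hmem (by simp [← h])
      have hpre : ([';'] : List Char).isPrefixOf (c :: rest) = false := by
        simp [List.isPrefixOf, hc]
      rw [show PySem.Chars.splitOn.go [';'] (fuel+1) (c :: rest) cur acc =
            PySem.Chars.splitOn.go [';'] fuel rest (c :: cur) acc from by
        simp [PySem.Chars.splitOn.go, hpre]]
      rw [ih rest (c :: cur) acc (by simp at hlen ⊢; omega)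
            (fun h => hmem (List.mem_cons_of_mem _ h))]
      simp

lemma split_no_sep (s : String) (h : PySem.Str.isIn ";" s = false) :
    PySem.Str.split? s ";" = some [s] := by
  have hmem : ';' ∉ s.toList := by
    intro hm
    have hinf : ([';'] : List Char) <:+: s.toList := (List.singleton_infix_iff _ _).mpr hm
    rw [PySem.Str.isIn_eq] at h
    exact (PySem.Chars.isIn_eq_false_iff _ _).mp h (by simpa using hinf)
  unfold PySem.Str.split?
  rw [show PySem.Chars.split? s.toList (";" : String).toList =
        some (PySem.Chars.splitOn s.toList [';']) from by simp [PySem.Chars.split?]]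
  unfold PySem.Chars.splitOn
  rw [splitOn_go_no_sep _ _ _ _ (by omega) hmem]
  simp

-- str.strip() is idempotent.
lemma chars_strip_norun (p : Char → Bool) (a : List Char) (ha : List.dropWhile p a = a) :
    List.dropWhile p (List.dropWhile p a.reverse).reverse = (List.dropWhile p a.reverse).reverse := by
  rw [List.dropWhile_eq_self_iff]
  intro hl hp
  set y := List.dropWhile p a.reverse with hy
  obtain ⟨t, ht⟩ := List.dropWhile_suffix (l := a.reverse) p
  have hyne : y ≠ [] := by
    intro h0; rw [h0] at hl; simp at hl
  have hane : a ≠ [] := fun h0 => hyne (by rw [hy, h0]; simp)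
  obtain ⟨c, cs, hc⟩ := List.exists_cons_of_ne_nil hane
  have h2 : y.getLast? = a.reverse.getLast? := by
    rw [← ht, List.getLast?_append]
    cases h3 : y.getLast? with
    | none => exact absurd (List.getLast?_eq_none_iff.mp h3) hyne
    | some v => simp
  have hnc : ¬ p c = true := by
    intro hpc
    rw [hc, List.dropWhile_cons_of_pos hpc] at ha
    have hlen := congrArg List.length ha
    have hsub := List.length_dropWhile_le p cs
    simp at hlen
    omega
  have h5 : y.getLast? = some c := by
    rw [h2, hc]; simp
  have h6 : y.reverse[0]? = some c := by
    rw [← List.head?_eq_getElem?, List.head?_reverse, h5]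
  have h7 : y.reverse[0] = c := by
    have h8 := List.getElem?_eq_getElem (l := y.reverse) (i := 0) hl
    rw [h6] at h8
    exact Option.some_injective _ h8.symm
  rw [h7] at hp
  exact hnc hp

lemma chars_strip_idem (l : List Char) :
    PySem.Chars.strip (PySem.Chars.strip l) = PySem.Chars.strip l := by
  unfold PySem.Chars.strip PySem.Chars.rstrip PySem.Chars.lstrip
  rw [chars_strip_norun _ _ (List.dropWhile_idempotent _ _), List.reverse_reverse]
  exact chars_strip_norun _ _ (List.dropWhile_idempotent _ _)

lemma str_strip_idem (s : String) :
    PySem.Str.strip (PySem.Str.strip s) = PySem.Str.strip s := by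
  unfold PySem.Str.strip
  rw [String.toList_ofList, chars_strip_idem]

lemma classify_strip (p : String) (app : Option String) :
    classify_b (PySem.Str.strip p) app = classify_b p app := by
  unfold classify_b
  rw [str_strip_idem]

-- Prefixes of the same string are comparable, so a prefix match excludes any
-- incomparable prefix.
lemma startswith_false_of_incomp (s p q : String) (hp : PySem.Str.startswith s p = true)
    (h1 : ¬ p.toList <+: q.toList) (h2 : ¬ q.toList <+: p.toList) :
    PySem.Str.startswith s q = false := by
  rw [PySem.Str.startswith_eq, PySem.Chars.startswith_iff] at hp
  rw [PySem.Str.startswith_eq]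
  by_contra hq
  rw [Bool.not_eq_false, PySem.Chars.startswith_iff] at hq
  rcases List.prefix_or_prefix_of_prefix hp hq with h | h
  · exact h1 h
  · exact h2 h

lemma any_startswith_false (s p : String) (l : List String)
    (hp : PySem.Str.startswith s p = true)
    (h : l.all (fun q => !(decide (p.toList <+: q.toList)) && !(decide (q.toList <+: p.toList))) = true) :
    l.any (fun q => PySem.Str.startswith s q) = false := by
  rw [List.any_eq_false]
  intro q hq
  have hh := List.all_eq_true.mp h q hq
  simp only [Bool.and_eq_true, Bool.not_eq_true', decide_eq_false_iff_not] at hh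
  rw [startswith_false_of_incomp s p q hp hh.1 hh.2]
  simp

-- The table scan over a block of "stop" rules.
lemma rules_stop (st low : String) (app : Option String) (gs : List String)
    (rest : List (String × String)) :
    rules_loop st low app (gs.map (fun g => (g, "stop")) ++ rest)
      = if gs.any (fun g => PySem.Str.startswith low g) then none
        else rules_loop st low app rest := by
  induction gs with
  | nil => simp
  | cons g gs ih =>
    simp only [List.map_cons, List.cons_append, rules_loop, List.any_cons]
    by_cases h : PySem.Str.startswith low g = true
    · rw [PySem.Str.startswith_eq] at h
      simp [h]
    · rw [Bool.not_eq_true, PySem.Str.startswith_eq] at h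
      simp [h, ih]

-- The table scan over a block of "app" rules.
lemma rules_app (st low : String) (app : Option String) (vs : List String) :
    rules_loop st low app (vs.map (fun v => (v, "app")))
      = if vs.any (fun v => PySem.Str.startswith low v) then
          (if pyTruthyOptStr app then app else none)
        else none := by
  induction vs with
  | nil => simp [rules_loop]
  | cons v vs ih =>
    simp only [List.map_cons, rules_loop, List.any_cons]
    by_cases h : PySem.Str.startswith low v = true
    · rw [PySem.Str.startswith_eq] at h
      simp [h]
    · rw [Bool.not_eq_true, PySem.Str.startswith_eq] at h
      simp [h, ih]

-- On a ';'-free action string (any positive fuel), A's port is B's single-action classifier.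
lemma go_eq_classify (fuel : Nat) (s : String) (app : Option String)
    (h : PySem.Str.isIn ";" s = false) :
    detect_focus_target_py_go (fuel + 1) s app = classify_b s app := by

  rw [detect_focus_target_py_go, if_neg (by rw [h]; exact Bool.false_ne_true)]
  have hsplit : pvRules =
      (["get ", "read ", "clipboard", "url", "tabs", "source", "hover", "observe"].map
        (fun g => (g, "stop"))) ++
      ([("switch to ", "switch"), ("activate ", "switch"), ("bring ", "switch"), ("open ", "open")] ++
       (["click", "type", "press", "fill", "scroll", "drag", "focus", "close", "select", "tap",
         "hit"].map (fun v => (v, "app")))) := rfl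
  have e1 : PySem.Str.len "switch to " = (10 : Int) := by decide
  have e2 : PySem.Str.len "activate " = (9 : Int) := by decide
  have e3 : PySem.Str.len "bring " = (6 : Int) := by decide
  simp only [classify_b, hsplit, rules_stop, List.cons_append, List.nil_append, rules_loop,
    rules_app, e1, e2, e3,
    eq_false (show ¬ ("switch" : String) = "stop" from by decide),
    eq_false (show ¬ ("switch" : String) = "open" from by decide),
    eq_false (show ¬ ("open" : String) = "stop" from by decide),
    eq_false (show ¬ ("open" : String) = "switch" from by decide),
    eq_self_iff_true, if_true, if_false]
  set st := PySem.Str.strip s with hst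
  set low := PySem.Str.lower st with hlow
  set M := (["click", "type", "press", "fill", "scroll", "drag", "focus", "close", "select",
    "tap", "hit"].any fun v => PySem.Str.startswith low v) with hM
  by_cases hg : (["get ", "read ", "clipboard", "url", "tabs", "source", "hover",
      "observe"].any fun g => PySem.Str.startswith low g) = true
  · simp only [hg, if_true]
  · simp only [hg, if_false]
    by_cases hb1 : PySem.Str.startswith low "switch to " = true
    · have hb2 := startswith_false_of_incomp low "switch to " "activate " hb1
        (by decide) (by decide)
      have hb3 := startswith_false_of_incomp low "switch to " "bring " hb1
        (by decide) (by decide)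
      have hb4 := startswith_false_of_incomp low "switch to " "open " hb1
        (by decide) (by decide)
      have hm : M = false := by
        rw [hM]
        exact any_startswith_false low "switch to " _ hb1 (by decide)
      simp only [hb1, hb2, hb3, hb4, hm, Bool.true_and, Bool.false_and, Bool.and_false,
        Bool.not_true, Bool.false_eq_true, if_false, if_true]
    · rw [Bool.not_eq_true] at hb1
      simp only [hb1, Bool.false_and, Bool.false_eq_true, if_false, Bool.not_false, if_true]
      by_cases hb2 : PySem.Str.startswith low "activate " = true
      · have hb3 := startswith_false_of_incomp low "activate " "bring " hb2
          (by decide) (by decide)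
        have hb4 := startswith_false_of_incomp low "activate " "open " hb2
          (by decide) (by decide)
        have hm : M = false := by
          rw [hM]
          exact any_startswith_false low "activate " _ hb2 (by decide)
        simp only [hb2, hb3, hb4, hm, Bool.true_and, Bool.false_and, Bool.and_false,
          Bool.not_true, Bool.false_eq_true, if_false, if_true]
      · rw [Bool.not_eq_true] at hb2
        simp only [hb2, Bool.false_and, Bool.false_eq_true, if_false, Bool.not_false, if_true]
        by_cases hb3 : PySem.Str.startswith low "bring " = true
        · have hb4 := startswith_false_of_incomp low "bring " "open " hb3
            (by decide) (by decide)
          have hm : M = false := by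
            rw [hM]
            exact any_startswith_false low "bring " _ hb3 (by decide)
          simp only [hb3, hb4, hm, Bool.true_and, Bool.false_and, Bool.and_false,
            Bool.not_true, Bool.false_eq_true, if_false, if_true]
        · rw [Bool.not_eq_true] at hb3
          simp only [hb3, Bool.false_and, Bool.false_eq_true, if_false, Bool.not_false, if_true]
          by_cases hb4 : PySem.Str.startswith low "open " = true
          · have hm : M = false := by
              rw [hM]
              exact any_startswith_false low "open " _ hb4 (by decide)
            simp only [hb4, hm, Bool.true_and, Bool.and_false, Bool.false_eq_true,
              Bool.not_true, if_false, if_true]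
          · rw [Bool.not_eq_true] at hb4
            simp only [hb4, Bool.false_and, Bool.false_eq_true, if_false, Bool.not_false,
              if_true]
            by_cases hm : M = true
            · simp only [hm, Bool.and_true, if_true]
            · rw [Bool.not_eq_true] at hm
              simp only [hm, Bool.and_false, Bool.false_eq_true, if_false]


-- The table scan never returns a falsy string.
lemma rules_none_or_truthy (st low : String) (app : Option String) :
    ∀ rs : List (String × String), rules_loop st low app rs = none ∨
      pyTruthyOptStr (rules_loop st low app rs) = true := by
  intro rs
  induction rs with
  | nil => exact Or.inl rfl
  | cons r rest ih =>
    obtain ⟨pre, kind⟩ := r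
    by_cases h1 : PySem.Str.startswith low pre = true
    · simp only [rules_loop, h1, Bool.not_true, Bool.false_eq_true, if_false]
      split_ifs with h2 h3 hg h4 hg h5
      · exact Or.inl rfl
      · exact Or.inr (by simp [pyTruthyOptStr, Bool.and_eq_true] at hg ⊢; exact hg.1)
      · exact Or.inl rfl
      · exact Or.inr (by simp [pyTruthyOptStr, Bool.and_eq_true] at hg ⊢; exact hg.1.1)
      · exact Or.inl rfl
      · exact Or.inr h5
      · exact Or.inl rfl
    · simp only [rules_loop, h1]
      simpa using ih

lemma classify_guard (s : String) (app : Option String) :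
    (if pyTruthyOptStr (classify_b s app) then classify_b s app else none)
      = classify_b s app := by
  rcases rules_none_or_truthy (PySem.Str.strip s) (PySem.Str.lower (PySem.Str.strip s)) app pvRules
    with h | h
  · simp only [classify_b] at h ⊢
    rw [h]
    rfl
  · simp only [classify_b] at h ⊢
    rw [if_pos h]

-- First truthy classification in a list of parts (how A's reversed early-return scan reads).
def firstT (app : Option String) : List String → Option String
  | [] => none
  | p :: rest =>
    let r := classify_b p app
    if pyTruthyOptStr r then r else firstT app rest

lemma firstT_guard (app : Option String) (l : List String) :
    (if pyTruthyOptStr (firstT app l) then firstT app l else none) = firstT app l := by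
  induction l with
  | nil => simp [firstT, pyTruthyOptStr]
  | cons p rest ih =>
    simp only [firstT]
    cases h : pyTruthyOptStr (classify_b p app) <;> simp [h, ih]

lemma firstT_append (app : Option String) (a b : List String) :
    firstT app (a ++ b)
      = if pyTruthyOptStr (firstT app a) then firstT app a else firstT app b := by
  induction a with
  | nil => simp [firstT, pyTruthyOptStr]
  | cons p rest ih =>
    simp only [List.cons_append, firstT]
    cases h : pyTruthyOptStr (classify_b p app) <;> simp [h, ih]

-- Once the running result is truthy, A's fold keeps it unchanged.
lemma foldl_truthy_keep (app : Option String) (fuel : Nat) : ∀ (l : List String) (acc : Option String),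
    pyTruthyOptStr acc = true →
    l.foldl (fun a part => if pyTruthyOptStr a then a
      else detect_focus_target_py_go (fuel + 1) (PySem.Str.strip part) app) acc = acc := by
  intro l
  induction l with
  | nil => intro acc _; rfl
  | cons p rest ih =>
    intro acc hacc
    rw [List.foldl_cons, if_pos hacc, ih acc hacc]

-- A's early-return fold over the chain parts is the first truthy classification.
lemma chain_eq (app : Option String) (fuel : Nat) : ∀ (l : List String),
    (∀ p ∈ l, PySem.Str.isIn ";" (PySem.Str.strip p) = false) →
    ∀ acc, pyTruthyOptStr acc = false →
    (if pyTruthyOptStr (l.foldl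
        (fun a part => if pyTruthyOptStr a then a
          else detect_focus_target_py_go (fuel + 1) (PySem.Str.strip part) app) acc) then
      (l.foldl
        (fun a part => if pyTruthyOptStr a then a
          else detect_focus_target_py_go (fuel + 1) (PySem.Str.strip part) app) acc)
     else none) = firstT app l := by
  intro l
  induction l with
  | nil =>
    intro _ acc hacc
    simp [firstT, hacc]
  | cons p rest ih =>
    intro hl acc hacc
    have hstep : (if pyTruthyOptStr acc then acc
        else detect_focus_target_py_go (fuel + 1) (PySem.Str.strip p) app)
        = classify_b p app := by
      rw [if_neg (by rw [hacc]; exact Bool.false_ne_true)]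
      rw [go_eq_classify fuel _ app (hl p (List.mem_cons_self))]
      exact classify_strip p app
    rw [List.foldl_cons, hstep]
    cases hres : pyTruthyOptStr (classify_b p app) with
    | true =>
      rw [foldl_truthy_keep app fuel rest _ hres, hres]
      simp [firstT, hres]
    | false =>
      rw [ih (fun q hq => hl q (List.mem_cons_of_mem _ hq)) _ hres]
      simp [firstT, hres]

-- B's forward overwrite fold computes the first truthy classification of the reversed list.
lemma foldl_last (app : Option String) (l : List String) : ∀ (acc : Option String),
    l.foldl (fun best part =>
        let result := classify_b part app
        if pyTruthyOptStr result then result else best) acc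
      = if pyTruthyOptStr (firstT app l.reverse) then firstT app l.reverse else acc := by
  induction l with
  | nil => intro acc; rfl
  | cons p rest ih =>
    intro acc
    rw [List.foldl_cons, ih]
    rw [List.reverse_cons, firstT_append]
    cases htr : pyTruthyOptStr (firstT app rest.reverse) with
    | true => simp only [htr, if_true]
    | false =>
      simp only [htr, Bool.false_eq_true, if_false, firstT]
      cases hr : pyTruthyOptStr (classify_b p app) with
      | true => simp only [hr, if_true]
      | false => simp only [hr, Bool.false_eq_true, if_false, pyTruthyOptStr]

-- ===== VERDICT (by name: the statement is the Claim_ definition above) =====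
theorem detect_focus_target_py_spec : Claim_equal_detect_focus_target_py := by
  intro action app _
  unfold Spec_detect_focus_target_py detect_focus_target_py detect_focus_target_py_alt
  cases hin : PySem.Str.isIn ";" action with
  | false =>
    rw [go_eq_classify _ _ _ hin, split_no_sep action hin]
    simp only [Option.getD_some, List.foldl_cons, List.foldl_nil]
    exact (classify_guard action app).symm
  | true =>
    have hts : (";" : String).toList = [';'] := rfl
    have hinf : (";" : String).toList <:+: action.toList := (PySem.Str.isIn_iff_infix _ _).mp hin
    have hne : action.toList ≠ [] := by
      intro h0
      rw [h0, hts] at hinf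
      have := hinf.length_le
      simp at this
    obtain ⟨k, hk⟩ : ∃ k, action.toList.length = k + 1 := by
      have := List.length_pos_iff.mpr hne
      exact ⟨action.toList.length - 1, by omega⟩
    have hsplit := PySem.Str.split?_map action ";"
    rw [hts] at hsplit
    rw [show PySem.Chars.split? action.toList [';'] =
        some (PySem.Chars.splitOn action.toList [';']) from by
      simp [PySem.Chars.split?]] at hsplit
    obtain ⟨ps, hps1, hps2⟩ := Option.map_eq_some_iff.mp hsplit
    have hpieces : ∀ p ∈ ps.reverse, PySem.Str.isIn ";" (PySem.Str.strip p) = false := by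
      intro p hp
      rw [List.mem_reverse] at hp
      have hmem : p.toList ∈ PySem.Chars.splitOn action.toList [';'] := by
        rw [← hps2]
        exact List.mem_map.mpr ⟨p, hp, rfl⟩
      have hnot : ';' ∉ p.toList := splitOn_single_not_mem ';' _ _ hmem
      have hnots : ';' ∉ (PySem.Str.strip p).toList := by
        rw [PySem.Str.toList_strip]
        exact fun hm => hnot (mem_of_mem_strip hm)
      rw [PySem.Str.isIn_eq, hts]
      exact (PySem.Chars.isIn_eq_false_iff _ _).mpr
        (fun hinf2 => hnots (List.singleton_sublist.mp hinf2.sublist))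
    rw [detect_focus_target_py_go, if_pos (by rw [hin])]
    simp only [hps1, Option.getD_some, Bool.not_true, Bool.false_eq_true, if_false]
    rw [hk]
    rw [chain_eq app k ps.reverse hpieces none rfl]
    rw [foldl_last]
    exact (firstT_guard app ps.reverse).symm
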